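-- pv_equiv track=rewrite | github.com/kimcaprio/open_ontology | src/services/ontology_service.py | _infer_referenced_table
-- ===== SOURCE A (Python) =====
-- from typing import Dict, List, Optional, Any
--
-- def _infer_referenced_table(column_name: str, table_names: List[str]) -> Optional[str]:
--     """Infer referenced table from foreign key column name"""
--     # Common patterns: CustomerId -> Customer, ArtistId -> Artist
--     if column_name.lower().endswith('id'):
--         base_name = column_name[:-2]  # Remove 'Id'
--
--         # Look for exact match
--         for table_name in table_names:
--             if table_name.lower() == base_name.lower():
--                 return table_name
--
--         # Look for partial match
--         for table_name in table_names:
--             if base_name.lower() in table_name.lower():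
--                 return table_name
--
--     return None
-- ===== SOURCE B (Python) =====
-- def _infer_referenced_table(column_name, table_names):
--     """Infer referenced table from foreign key column name (single pass)."""
--     if column_name.lower().endswith('id'):
--         base_lower = column_name[:-2].lower()
--         partial = None
--         for table_name in table_names:
--             if table_name.lower() == base_lower:
--                 return table_name
--             if partial is None and base_lower in table_name.lower():
--                 partial = table_name
--         return partial
--     return None
-- ===== Notes on version B (the rewrite author's own statement) =====
-- stated objective: alternative
-- what changed: Replaces A's two full scans (exact-match pass, then partial-match pass) with a single pass that returns an exact match immediately while carrying the first partial-match candidate, and lowercases the base name once instead of per comparison.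
import Mathlib
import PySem

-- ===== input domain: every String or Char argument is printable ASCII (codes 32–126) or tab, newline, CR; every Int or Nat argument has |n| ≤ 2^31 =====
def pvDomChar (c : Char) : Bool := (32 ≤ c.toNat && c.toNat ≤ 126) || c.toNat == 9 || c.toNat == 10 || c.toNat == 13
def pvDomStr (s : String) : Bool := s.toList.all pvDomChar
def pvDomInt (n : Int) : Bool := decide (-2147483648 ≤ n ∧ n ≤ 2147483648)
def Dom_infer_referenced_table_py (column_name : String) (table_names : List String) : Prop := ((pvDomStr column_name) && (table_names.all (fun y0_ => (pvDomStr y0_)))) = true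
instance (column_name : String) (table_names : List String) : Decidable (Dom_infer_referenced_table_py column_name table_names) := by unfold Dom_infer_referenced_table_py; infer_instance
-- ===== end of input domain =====

-- B replaces A's two full scans with a single pass carrying the first partial-match candidate; same cost, alternative decomposition.


-- ===== PORT A =====
-- first loop of A: look for exact case-insensitive match
def pvFindExact (base : String) : List String → Option String
  | [] => none
  | t :: ts =>
      if PySem.Str.lower t == PySem.Str.lower base then some t else pvFindExact base ts

-- second loop of A: look for partial match (substring)
def pvFindPartial (base : String) : List String → Option String
  | [] => none
  | t :: ts =>
      if PySem.Str.isIn (PySem.Str.lower base) (PySem.Str.lower t) then some t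
      else pvFindPartial base ts

def infer_referenced_table_py (column_name : String) (table_names : List String) : Option String :=
  if PySem.Str.endswith (PySem.Str.lower column_name) "id" then
    let base := PySem.Str.slice column_name none (some (-2))
    match pvFindExact base table_names with
    | some r => some r
    | none => pvFindPartial base table_names
  else none

-- ===== PORT B =====
-- single pass: return an exact match at once, carry the first partial-match candidate
def pvScan (baseLower : String) : List String → Option String → Option String
  | [], part => part
  | t :: ts, part =>
      if PySem.Str.lower t == baseLower then some t
      else pvScan baseLower ts
        (if part.isNone && PySem.Str.isIn baseLower (PySem.Str.lower t) then some t else part)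

def infer_referenced_table_py_alt (column_name : String) (table_names : List String) : Option String :=
  if PySem.Str.endswith (PySem.Str.lower column_name) "id" then
    let baseLower := PySem.Str.lower (PySem.Str.slice column_name none (some (-2)))
    pvScan baseLower table_names none
  else none

-- ===== PRECONDITION & SPEC =====
def Spec_infer_referenced_table_py (column_name : String) (table_names : List String) (out : Option String) : Prop := out = infer_referenced_table_py_alt column_name table_names
instance (column_name : String) (table_names : List String) (out : Option String) : Decidable (Spec_infer_referenced_table_py column_name table_names out) := by unfold Spec_infer_referenced_table_py; infer_instance

-- ===== CLAIM (what is proved, stated in full; the proofs are below) =====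
def Claim_equal_infer_referenced_table_py : Prop := ∀ (column_name : String) (table_names : List String), Dom_infer_referenced_table_py column_name table_names → Spec_infer_referenced_table_py column_name table_names (infer_referenced_table_py column_name table_names)

-- ===== LEMMAS AND PROOFS =====

-- the single pass equals: first exact match if any, else the carried candidate, else the first partial match
lemma pvScan_eq (base : String) (ts : List String) (part : Option String) :
    pvScan (PySem.Str.lower base) ts part =
      match pvFindExact base ts with
      | some r => some r
      | none =>
          match part with
          | some p => some p
          | none => pvFindPartial base ts := by
  induction ts generalizing part with
  | nil => cases part <;> simp [pvScan, pvFindExact, pvFindPartial]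
  | cons t ts ih =>
      simp only [pvScan, pvFindExact, pvFindPartial]
      by_cases hx : PySem.Str.lower t == PySem.Str.lower base
      · simp [hx]
      · rw [if_neg hx, if_neg hx, ih]
        cases part with
        | some p => simp
        | none =>
            cases hfe : pvFindExact base ts <;>
              by_cases hp : PySem.Chars.isIn (PySem.Chars.lower base.toList) (PySem.Chars.lower t.toList) = true <;>
                simp [hp]

-- ===== VERDICT (by name: the statement is the Claim_ definition above) =====
theorem infer_referenced_table_py_spec : Claim_equal_infer_referenced_table_py := by
  intro column_name table_names _
  simp only [Spec_infer_referenced_table_py, infer_referenced_table_py, infer_referenced_table_py_alt]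
  split_ifs with hg
  · rw [pvScan_eq]
  · rfl
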